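-- pv_equiv track=rewrite | github.com/vibe-builder/PST-Email-Extractor | src/pst_email_extractor/pst_parser.py | _collect_received_hosts
-- ===== SOURCE A (Python) =====
-- def _collect_received_hosts(transport_headers: str) -> str:
--     """
--     Extract Received headers to track email path.
--
--     Parses all 'Received:' headers from the transport headers and extracts
--     the host/server information from each hop. This provides a trail of
--     servers the email passed through.
--
--     Returns a semicolon-separated string of received headers, or empty string if none found.
--     """
--     if not transport_headers:
--         return ""
--
--     received_lines = []
--     lines = transport_headers.split("\n")
--     i = 0
--
--     while i < len(lines):
--         line = lines[i]
--         line_lower = line.lower()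
--
--         # Check for Received header
--         if line_lower.startswith("received:"):
--             # Capture the full header including continuation lines
--             full_header = line
--             i += 1
--             # Handle multi-line continuation (lines starting with whitespace)
--             while i < len(lines) and lines[i].startswith((" ", "\t")):
--                 full_header += " " + lines[i].strip()
--                 i += 1
--
--             # Clean up and add to list
--             received_lines.append(full_header.strip())
--             continue
--
--         i += 1
--
--     # Join all received headers with semicolons for readability
--     return "; ".join(received_lines)
-- ===== SOURCE B (Python) =====
-- def _collect_received_hosts(transport_headers: str) -> str:
--     # Single forward fold: unfold physical lines into logical headers, then filter.
--     logical = []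
--     cur = None
--     for line in transport_headers.split("\n"):
--         if line.startswith((" ", "\t")) and cur is not None:
--             cur += " " + line.strip()
--         else:
--             if cur is not None:
--                 logical.append(cur)
--             cur = line
--     if cur is not None:
--         logical.append(cur)
--     return "; ".join(h.strip() for h in logical
--                      if h.lower().startswith("received:"))
-- ===== Notes on version B (the rewrite author's own statement) =====
-- stated objective: simpler
-- what changed: A's index-driven while-loop with a nested continuation-consuming inner while is replaced by a single forward fold that unfolds physical lines into logical headers, followed by a filter/map pass selecting the Received headers.
import Mathlib
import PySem

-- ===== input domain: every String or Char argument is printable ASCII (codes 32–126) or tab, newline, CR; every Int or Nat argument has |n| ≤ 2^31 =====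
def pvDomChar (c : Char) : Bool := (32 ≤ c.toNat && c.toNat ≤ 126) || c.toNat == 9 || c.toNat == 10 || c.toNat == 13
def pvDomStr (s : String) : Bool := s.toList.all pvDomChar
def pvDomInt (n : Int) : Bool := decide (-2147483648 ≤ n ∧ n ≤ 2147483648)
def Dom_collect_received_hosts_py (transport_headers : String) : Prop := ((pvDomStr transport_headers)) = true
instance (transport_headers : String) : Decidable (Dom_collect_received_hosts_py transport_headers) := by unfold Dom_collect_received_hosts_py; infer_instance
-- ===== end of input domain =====

-- B replaces A's index-driven while-loop (inner continuation-eating while + continue) by one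
-- forward fold that unfolds physical lines into logical headers, then a filter/map pass; objective: simpler.

-- line.startswith((" ", "\t")) — used verbatim by both Pythons
def pvCont (l : List Char) : Bool :=
  PySem.Chars.startswith l [' '] || PySem.Chars.startswith l ['\t']

-- h.lower().startswith("received:")
def pvRecvd (h : List Char) : Bool :=
  PySem.Chars.startswith (PySem.Chars.lower h) "received:".toList

-- ===== PORT A =====
-- A's inner while: eat continuation lines into full_header
def pvConsumeA : List Char → List (List Char) → List Char × List (List Char)
  | fh, [] => (fh, [])
  | fh, l :: rest =>
    if pvCont l then pvConsumeA (fh ++ ' ' :: PySem.Chars.strip l) rest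
    else (fh, l :: rest)

theorem pvConsumeA_snd_len : ∀ (rest : List (List Char)) (fh : List Char),
    (pvConsumeA fh rest).2.length ≤ rest.length := by
  intro rest
  induction rest with
  | nil => intro fh; simp [pvConsumeA]
  | cons l r ih =>
    intro fh
    simp only [pvConsumeA]
    split
    · exact Nat.le_trans (ih _) (Nat.le_succ _)
    · simp

-- A's outer while over the line index, with the accumulating received_lines
def pvLoopA : List (List Char) → List (List Char) → List (List Char)
  | [], acc => acc
  | l :: rest, acc =>
    if pvRecvd l then
      pvLoopA (pvConsumeA l rest).2 (acc ++ [PySem.Chars.strip (pvConsumeA l rest).1])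
    else
      pvLoopA rest acc
termination_by lines _ => lines.length
decreasing_by
  · have := pvConsumeA_snd_len rest l; simp; omega
  · simp

def collect_received_hosts_py (transport_headers : String) : String :=
  if transport_headers.toList = [] then ""
  else
    String.ofList (PySem.Chars.join "; ".toList
      (pvLoopA (PySem.Chars.splitOn transport_headers.toList ['\n']) []))

-- ===== PORT B =====
-- B's single for-loop: fold physical lines into (logical headers, current header)
def pvFoldB : List (List Char) → List (List Char) → Option (List Char) →
    List (List Char) × Option (List Char)
  | [], logical, cur => (logical, cur)
  | l :: rest, logical, cur =>
    match cur with
    | some c =>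
      if pvCont l then pvFoldB rest logical (some (c ++ ' ' :: PySem.Chars.strip l))
      else pvFoldB rest (logical ++ [c]) (some l)
    | none => pvFoldB rest logical (some l)

-- B's trailing 'if cur is not None: logical.append(cur)'
def pvFinal : List (List Char) × Option (List Char) → List (List Char)
  | (logical, some c) => logical ++ [c]
  | (logical, none) => logical

def collect_received_hosts_py_alt (transport_headers : String) : String :=
  let logical := pvFinal (pvFoldB (PySem.Chars.splitOn transport_headers.toList ['\n']) [] none)
  String.ofList (PySem.Chars.join "; ".toList
    ((logical.filter pvRecvd).map PySem.Chars.strip))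

-- ===== PRECONDITION & SPEC =====
def Spec_collect_received_hosts_py (transport_headers : String) (out : String) : Prop := out = collect_received_hosts_py_alt transport_headers
instance (transport_headers : String) (out : String) : Decidable (Spec_collect_received_hosts_py transport_headers out) := by unfold Spec_collect_received_hosts_py; infer_instance

-- ===== CLAIM (what is proved, stated in full; the proofs are below) =====
def Claim_equal_collect_received_hosts_py : Prop := ∀ (transport_headers : String), Dom_collect_received_hosts_py transport_headers → Spec_collect_received_hosts_py transport_headers (collect_received_hosts_py transport_headers)

-- ===== LEMMAS AND PROOFS =====

-- drop the leading continuation lines (what A's inner while leaves behind)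
def pvDrop : List (List Char) → List (List Char)
  | [] => []
  | l :: rest => if pvCont l then pvDrop rest else l :: rest

theorem pvDrop_len : ∀ (rest : List (List Char)), (pvDrop rest).length ≤ rest.length := by
  intro rest
  induction rest with
  | nil => simp [pvDrop]
  | cons l r ih =>
    simp only [pvDrop]
    split
    · exact Nat.le_trans ih (Nat.le_succ _)
    · simp

-- the logical headers of a fresh block of lines
def pvGroups : List (List Char) → List (List Char)
  | [] => []
  | l :: rest => (pvConsumeA l rest).1 :: pvGroups (pvDrop rest)
termination_by lines => lines.length
decreasing_by
  have := pvDrop_len rest; simp; omega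

theorem pvConsumeA_snd : ∀ (rest : List (List Char)) (fh : List Char),
    (pvConsumeA fh rest).2 = pvDrop rest := by
  intro rest
  induction rest with
  | nil => intro fh; simp [pvConsumeA, pvDrop]
  | cons l r ih =>
    intro fh
    simp only [pvConsumeA, pvDrop]
    split
    · exact ih _
    · rfl

theorem pvRecvd_append_space (fh t : List Char) :
    pvRecvd (fh ++ ' ' :: t) = pvRecvd fh := by
  have key : ∀ (x y : List Char),
      ("received:".toList <+: x ++ ' ' :: y) ↔ ("received:".toList <+: x) := by
    intro x y
    constructor
    · intro h
      by_cases hl : ("received:".toList).length ≤ x.length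
      · exact List.prefix_of_prefix_length_le h (List.prefix_append x (' ' :: y)) hl
      · exfalso
        replace hl := Nat.lt_of_not_le hl
        obtain ⟨t', ht⟩ := h
        have h1 : ("received:".toList ++ t')[x.length]? = (x ++ ' ' :: y)[x.length]? := by
          rw [ht]
        rw [List.getElem?_append_left (by omega), List.getElem?_append_right (le_refl _)] at h1
        simp only [Nat.sub_self, List.getElem?_cons_zero] at h1
        exact absurd (List.mem_of_getElem? h1) (by decide)
    · intro h
      exact h.trans (List.prefix_append x (' ' :: y))
  simp only [pvRecvd, PySem.Chars.lower, List.map_append, List.map_cons]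
  have hsp : PySem.Chars.lowerChar ' ' = ' ' := rfl
  rw [hsp]
  rw [Bool.eq_iff_iff]
  simp only [PySem.Chars.startswith_iff]
  exact key _ _

theorem pvConsumeA_recvd : ∀ (rest : List (List Char)) (fh : List Char),
    pvRecvd (pvConsumeA fh rest).1 = pvRecvd fh := by
  intro rest
  induction rest with
  | nil => intro fh; simp [pvConsumeA]
  | cons l r ih =>
    intro fh
    simp only [pvConsumeA]
    split
    · rw [ih, pvRecvd_append_space]
    · rfl

theorem pvCont_not_recvd (l : List Char) (h : pvCont l = true) : pvRecvd l = false := by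
  obtain ⟨a, t, ha, rfl⟩ : ∃ a t, (a = ' ' ∨ a = '	') ∧ l = a :: t := by
    simp only [pvCont, Bool.or_eq_true, PySem.Chars.startswith_iff] at h
    rcases h with ⟨t, ht⟩ | ⟨t, ht⟩
    · exact ⟨' ', t, Or.inl rfl, ht.symm⟩
    · exact ⟨'	', t, Or.inr rfl, ht.symm⟩
  simp only [pvRecvd, PySem.Chars.lower, List.map_cons]
  rw [Bool.eq_false_iff]
  intro hc
  rw [PySem.Chars.startswith_iff, show "received:".toList = 'r' :: "eceived:".toList from rfl,
      List.cons_prefix_cons] at hc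
  obtain ⟨h0, -⟩ := hc
  rcases ha with rfl | rfl <;> exact absurd h0.symm (by decide)

theorem pvGroups_drop_filter (rest : List (List Char)) :
    (pvGroups (pvDrop rest)).filter pvRecvd = (pvGroups rest).filter pvRecvd := by
  induction rest with
  | nil => rfl
  | cons c r ih =>
    by_cases hc : pvCont c = true
    · have h1 : pvDrop (c :: r) = pvDrop r := by simp [pvDrop, hc]
      have h2 : pvGroups (c :: r) = (pvConsumeA c r).1 :: pvGroups (pvDrop r) := by
        simp [pvGroups]
      rw [h1, h2, List.filter_cons_of_neg (by rw [pvConsumeA_recvd, pvCont_not_recvd c hc]; simp)]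
    · simp [pvDrop, hc]

theorem pvLoopA_eq : ∀ (lines acc : List (List Char)),
    pvLoopA lines acc = acc ++ ((pvGroups lines).filter pvRecvd).map PySem.Chars.strip := by
  intro lines acc
  induction lines, acc using pvLoopA.induct with
  | case1 acc => simp [pvLoopA, pvGroups]
  | case2 l rest acc hr ih =>
    rw [pvLoopA, if_pos hr, ih]
    have hg : pvGroups (l :: rest) = (pvConsumeA l rest).1 :: pvGroups (pvDrop rest) := by
      simp [pvGroups]
    rw [hg, List.filter_cons_of_pos (by rw [pvConsumeA_recvd]; exact hr), List.map_cons,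
        pvConsumeA_snd]
    simp
  | case3 l rest acc hr ih =>
    rw [pvLoopA, if_neg hr, ih]
    have hg : pvGroups (l :: rest) = (pvConsumeA l rest).1 :: pvGroups (pvDrop rest) := by
      simp [pvGroups]
    rw [hg, List.filter_cons_of_neg (by rw [pvConsumeA_recvd]; simpa using hr), pvGroups_drop_filter]

theorem pvFoldB_eq : ∀ (lines logical : List (List Char)) (c : List Char),
    pvFinal (pvFoldB lines logical (some c)) =
      logical ++ (pvConsumeA c lines).1 :: pvGroups (pvDrop lines) := by
  intro lines
  induction lines with
  | nil => intro logical c; simp [pvFoldB, pvFinal, pvConsumeA, pvDrop, pvGroups]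
  | cons l rest ih =>
    intro logical c
    by_cases hc : pvCont l = true
    · simp only [pvFoldB]
      rw [if_pos hc, ih]
      simp [pvConsumeA, pvDrop, hc]
    · simp only [pvFoldB]
      rw [if_neg hc, ih]
      have h1 : pvConsumeA c (l :: rest) = (c, l :: rest) := by simp [pvConsumeA, hc]
      have h2 : pvDrop (l :: rest) = l :: rest := by simp [pvDrop, hc]
      have hg : pvGroups (l :: rest) = (pvConsumeA l rest).1 :: pvGroups (pvDrop rest) := by
        simp [pvGroups]
      rw [h1, h2, hg]
      simp

-- ===== VERDICT (by name: the statement is the Claim_ definition above) =====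
theorem collect_received_hosts_py_spec : Claim_equal_collect_received_hosts_py := by
  unfold Claim_equal_collect_received_hosts_py
  intro s _
  unfold Spec_collect_received_hosts_py
  by_cases h : s.toList = []
  · have hs : s = "" := by
      have := congrArg String.ofList h
      simpa using this
    subst hs
    decide
  · unfold collect_received_hosts_py collect_received_hosts_py_alt
    rw [if_neg h]
    cases hl : PySem.Chars.splitOn s.toList ['\n'] with
    | nil => simp [pvLoopA, pvFoldB, pvFinal]
    | cons l rest =>
      have hb : pvFinal (pvFoldB (l :: rest) [] none) = pvGroups (l :: rest) := by
        simp only [pvFoldB]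
        rw [pvFoldB_eq]
        simp [pvGroups]
      simp only [hb]
      rw [pvLoopA_eq]
      simp
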